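-- pv_equiv track=rewrite | github.com/Taeheon-Lee/Programmers | level1/pe_clothes.py | solution
-- ===== SOURCE A (Python) =====
-- def solution(n, lost, reserve):
--     real_lost = []                      # for문 반복 시, remove 사용하여 탐색 중 가운데를 삭제될 경우, 삭제된 것을 고려하지 않고 다음으로 가기 때문에 한 칸을 더 넘어가게 됨
--                                         # 따라서 진짜 체육복이 없는 사람을 포함할 새로운 리스트 생성
--     for person in lost:
--         if person in reserve:           # 도난 당했으나, 여벌을 가지고 있는 경우, 실제 체육복이 있다고 판단하고 여벌은 없다고 판단
--             reserve.remove(person)      # 여벌 체육복을 가지고 있는 사람 리스트에서 제거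
--         else:
--             real_lost.append(person)    # 아닐 경우, 진짜 체육복을 도난당한 사람 리스트에 추가
--     answer = n-len(real_lost)           # 전체 사람 수에서 진짜 체육복을 도난당한 사람을 뺀 자기 체육복을 가지고 있는 사람 수
--     real_lost.sort()                    # 도난 당한 사람들이 앞사람의 여벌 유무를 우선 체크하고 뒷사람을 체크하는 매커니즘을 모두 적용하여 최대 체육 수업 참여 가능한 사람을 구하기 위하여 정렬
--                                         # 만약 정렬되어 있지 않은 경우, 정렬되지 않은 가운데 번호 사람이 먼저 해당 매커니즘을 적용 받아 앞사람은 해당 매커니즘을 적용하지 못하는 경우 발생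
--     for person in real_lost:            # 먼저 앞사람 여별복 유무를 판단하고 뒷사람을 판단하여 여벌복을 빌리는 매커니즘 적용
--         if person-1 in reserve:         # 앞사람 여벌복 유무 체크
--             reserve.remove(person-1)    # 여벌복을 빌릴 경우, 여벌복을 가지고 있는 리스트에서 해당 사람을 제거
--             answer += 1                 # 체육 수업 참여 가능 수 추가
--         elif person+1 in reserve:       # 뒷사람 여벌복 유무 체크
--             reserve.remove(person+1)    # 여벌복을 빌릴 경우, 여벌복을 가지고 있는 리스트에서 해당 사람을 제거
--             answer += 1                 # 체육 수업 참여 가능 수 추가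
--     return answer
-- ===== SOURCE B (Python) =====
-- def solution(n, lost, reserve):
--     # Value-batched counting sweep: cancel lost/reserve per value arithmetically,
--     # then one pass over sorted distinct needy values moving min()-batches of
--     # spares from v-1 then v+1; no per-person second loop, `reserve` not mutated.
--     lc, rc = {}, {}
--     for p in lost:
--         lc[p] = lc.get(p, 0) + 1
--     for r in reserve:
--         rc[r] = rc.get(r, 0) + 1
--     need = {v: k - rc.get(v, 0) for v, k in lc.items() if k > rc.get(v, 0)}
--     spare = {v: k - lc.get(v, 0) for v, k in rc.items() if k > lc.get(v, 0)}
--     answer = n - sum(need.values())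
--     for v in sorted(need):
--         k = need[v]
--         t = min(k, spare.get(v - 1, 0))
--         spare[v - 1] = spare.get(v - 1, 0) - t
--         u = min(k - t, spare.get(v + 1, 0))
--         spare[v + 1] = spare.get(v + 1, 0) - u
--         answer += t + u
--     return answer
-- ===== Notes on version B (the rewrite author's own statement) =====
-- stated objective: faster
-- what changed: Replaces A's per-person loops with list scans/remove by a value-batched counting sweep: per-value multiset cancellation computed arithmetically (max(0, lost-reserve)), then a single pass over the sorted distinct needy values transferring min()-sized batches of spares from v-1 then v+1; the second pass runs over distinct values, not persons, and B does not mutate the caller's reserve list (return value identical).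
import Mathlib
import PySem

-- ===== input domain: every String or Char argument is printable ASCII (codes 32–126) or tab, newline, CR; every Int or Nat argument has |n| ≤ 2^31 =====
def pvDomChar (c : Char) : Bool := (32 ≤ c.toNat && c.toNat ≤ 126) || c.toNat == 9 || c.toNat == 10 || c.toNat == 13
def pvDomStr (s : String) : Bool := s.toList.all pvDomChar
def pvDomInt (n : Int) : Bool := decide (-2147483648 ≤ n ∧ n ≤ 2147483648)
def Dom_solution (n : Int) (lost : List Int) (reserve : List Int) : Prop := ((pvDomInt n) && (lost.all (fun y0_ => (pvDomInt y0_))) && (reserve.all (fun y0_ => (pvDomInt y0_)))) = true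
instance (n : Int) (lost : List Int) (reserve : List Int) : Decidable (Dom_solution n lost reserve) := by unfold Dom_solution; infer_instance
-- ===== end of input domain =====

-- B replaces A's per-person scans with a value-batched counting sweep (objective: faster);
-- A mutates the caller's `reserve` list, B does not — the equivalence proved is about the RETURN value only.

-- ===== PORT A =====
-- first loop of A: state (real_lost, reserve); `person in reserve` / `reserve.remove`
def solLoopA1 (st : List Int × List Int) (person : Int) : List Int × List Int :=
  if person ∈ st.2 then (st.1, (PySem.List.remove? st.2 person).getD st.2)
  else (st.1 ++ [person], st.2)

-- second loop of A: state (answer, reserve)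
def solLoopA2 (st : Int × List Int) (person : Int) : Int × List Int :=
  if person - 1 ∈ st.2 then (st.1 + 1, (PySem.List.remove? st.2 (person - 1)).getD st.2)
  else if person + 1 ∈ st.2 then (st.1 + 1, (PySem.List.remove? st.2 (person + 1)).getD st.2)
  else st

def solution (n : Int) (lost : List Int) (reserve : List Int) : Int :=
  let st1 := lost.foldl solLoopA1 ([], reserve)
  let realLost := st1.1
  let answer := n - (realLost.length : Int)
  let realLostSorted := PySem.List.sorted realLost (fun x => x) false
  (realLostSorted.foldl solLoopA2 (answer, st1.2)).1

-- ===== PORT B =====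
-- body of B's sweep over a needy value v: take min-batches of spares from v-1, then v+1
def solSweepB (need : PySem.Dict Int Int) (st : Int × PySem.Dict Int Int) (v : Int) : Int × PySem.Dict Int Int :=
  let k := need.getD v 0        -- Python `need[v]`: v is always a key of `need` here
  let t := min k (st.2.getD (v - 1) 0)
  let sp1 := st.2.insert (v - 1) (st.2.getD (v - 1) 0 - t)
  let u := min (k - t) (sp1.getD (v + 1) 0)
  (st.1 + t + u, sp1.insert (v + 1) (sp1.getD (v + 1) 0 - u))

def solution_alt (n : Int) (lost : List Int) (reserve : List Int) : Int :=
  let lc := lost.foldl (fun d p => d.insert p (d.getD p 0 + 1)) PySem.Dict.empty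
  let rc := reserve.foldl (fun d r => d.insert r (d.getD r 0 + 1)) PySem.Dict.empty
  let need := (lc.items.filter (fun vk => rc.getD vk.1 0 < vk.2)).foldl
      (fun d vk => d.insert vk.1 (vk.2 - rc.getD vk.1 0)) PySem.Dict.empty
  let spare := (rc.items.filter (fun vk => lc.getD vk.1 0 < vk.2)).foldl
      (fun d vk => d.insert vk.1 (vk.2 - lc.getD vk.1 0)) PySem.Dict.empty
  let answer := n - need.values.sum
  ((PySem.List.sorted need.keys (fun x => x) false).foldl (solSweepB need) (answer, spare)).1

-- ===== PRECONDITION & SPEC =====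
def Spec_solution (n : Int) (lost : List Int) (reserve : List Int) (out : Int) : Prop := out = solution_alt n lost reserve
instance (n : Int) (lost : List Int) (reserve : List Int) (out : Int) : Decidable (Spec_solution n lost reserve out) := by unfold Spec_solution; infer_instance

-- ===== CLAIM =====
def Claim_equal_solution : Prop := ∀ (n : Int) (lost : List Int) (reserve : List Int), Dom_solution n lost reserve → Spec_solution n lost reserve (solution n lost reserve)

-- ===== LEMMAS AND PROOFS =====

-- Phase 1 of A, characterised by per-value counts (Nat truncated subtraction).
lemma phase1_counts : ∀ (lost acc res : List Int),
    (∀ x : Int, ((lost.foldl solLoopA1 (acc, res)).1.count x)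
        = acc.count x + (lost.count x - min (lost.count x) (res.count x)))
    ∧ (∀ x : Int, ((lost.foldl solLoopA1 (acc, res)).2.count x)
        = res.count x - min (lost.count x) (res.count x)) := by
  intro lost
  induction lost with
  | nil => intro acc res; simp
  | cons p rest ih =>
    intro acc res
    simp only [List.foldl_cons]
    by_cases hp : p ∈ res
    · have hrm : PySem.List.remove? res p = some (res.erase p) :=
        PySem.List.remove?_eq_some_erase res p hp
      have hpos : 0 < res.count p := List.count_pos_iff.mpr hp
      simp only [solLoopA1, if_pos hp, hrm, Option.getD_some]
      obtain ⟨h1, h2⟩ := ih acc (res.erase p)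
      constructor
      · intro x
        rw [h1 x, List.count_cons]
        by_cases hx : x = p
        · subst hx; rw [List.count_erase_self]; simp; omega
        · rw [List.count_erase_of_ne hx]; simp [Ne.symm hx]
      · intro x
        rw [h2 x, List.count_cons]
        by_cases hx : x = p
        · subst hx; rw [List.count_erase_self]; simp; omega
        · rw [List.count_erase_of_ne hx]; simp [Ne.symm hx]
    · have hz : res.count p = 0 := List.count_eq_zero.mpr hp
      simp only [solLoopA1, if_neg hp]
      obtain ⟨h1, h2⟩ := ih (acc ++ [p]) res
      constructor
      · intro x
        rw [h1 x, List.count_append, List.count_cons]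
        by_cases hx : x = p
        · subst hx; simp [hz]; omega
        · simp [Ne.symm hx]
      · intro x
        rw [h2 x, List.count_cons]
        by_cases hx : x = p
        · subst hx; simp [hz]
        · simp [Ne.symm hx]

-- Processing a block of k equal persons v in A's second loop.
lemma blockA (v : Int) : ∀ (k : Nat) (ans : Int) (res : List Int),
    (((List.replicate k v).foldl solLoopA2 (ans, res)).1
        = ans + min (k : Int) (res.count (v - 1) : Int)
            + min ((k : Int) - min (k : Int) (res.count (v - 1) : Int)) (res.count (v + 1) : Int))
    ∧ (∀ x : Int, ((((List.replicate k v).foldl solLoopA2 (ans, res)).2.count x : Int))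
        = if x = v - 1 then (res.count x : Int) - min (k : Int) (res.count (v - 1) : Int)
          else if x = v + 1 then (res.count x : Int)
              - min ((k : Int) - min (k : Int) (res.count (v - 1) : Int)) (res.count (v + 1) : Int)
          else (res.count x : Int)) := by
  intro k
  induction k with
  | zero =>
    intro ans res
    constructor
    · simp
    · intro x; simp
  | succ m ih =>
    intro ans res
    rw [List.replicate_succ, List.foldl_cons]
    have hne : v - 1 ≠ v + 1 := by omega
    by_cases h1 : v - 1 ∈ res
    · have hrm : PySem.List.remove? res (v - 1) = some (res.erase (v - 1)) :=
        PySem.List.remove?_eq_some_erase res (v - 1) h1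
      have hpos : 0 < res.count (v - 1) := List.count_pos_iff.mpr h1
      simp only [solLoopA2, if_pos h1, hrm, Option.getD_some]
      obtain ⟨g1, g2⟩ := ih (ans + 1) (res.erase (v - 1))
      have e1 : (res.erase (v - 1)).count (v - 1) = res.count (v - 1) - 1 :=
        List.count_erase_self ..
      have e2 : (res.erase (v - 1)).count (v + 1) = res.count (v + 1) :=
        List.count_erase_of_ne (Ne.symm hne) ..
      constructor
      · rw [g1, e1, e2]; push_cast; omega
      · intro x
        rw [g2 x]
        by_cases hx1 : x = v - 1
        · subst hx1; rw [if_pos rfl, if_pos rfl, e1]; push_cast; omega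
        · rw [if_neg hx1, if_neg hx1, List.count_erase_of_ne hx1, e1, e2]
          by_cases hx2 : x = v + 1
          · subst hx2; rw [if_pos rfl, if_pos rfl]; push_cast; omega
          · rw [if_neg hx2, if_neg hx2]
    · have hz1 : res.count (v - 1) = 0 := List.count_eq_zero.mpr h1
      by_cases h2 : v + 1 ∈ res
      · have hrm : PySem.List.remove? res (v + 1) = some (res.erase (v + 1)) :=
          PySem.List.remove?_eq_some_erase res (v + 1) h2
        have hpos : 0 < res.count (v + 1) := List.count_pos_iff.mpr h2
        simp only [solLoopA2, if_neg h1, if_pos h2, hrm, Option.getD_some]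
        obtain ⟨g1, g2⟩ := ih (ans + 1) (res.erase (v + 1))
        have e1 : (res.erase (v + 1)).count (v - 1) = res.count (v - 1) :=
          List.count_erase_of_ne hne ..
        have e2 : (res.erase (v + 1)).count (v + 1) = res.count (v + 1) - 1 :=
          List.count_erase_self ..
        constructor
        · rw [g1, e1, e2, hz1]; push_cast; omega
        · intro x
          rw [g2 x]
          by_cases hx1 : x = v - 1
          · subst hx1; rw [if_pos rfl, if_pos rfl, e1, hz1]; push_cast; omega
          · rw [if_neg hx1, if_neg hx1, e1, hz1]
            by_cases hx2 : x = v + 1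
            · subst hx2; rw [if_pos rfl, if_pos rfl, e2]; push_cast; omega
            · rw [if_neg hx2, if_neg hx2, List.count_erase_of_ne hx2]
      · have hz2 : res.count (v + 1) = 0 := List.count_eq_zero.mpr h2
        simp only [solLoopA2, if_neg h1, if_neg h2]
        obtain ⟨g1, g2⟩ := ih ans res
        constructor
        · rw [g1, hz1, hz2]; push_cast; omega
        · intro x
          rw [g2 x]
          split_ifs with hx1 hx2
          · rw [hz1]; push_cast; omega
          · rw [hz1, hz2]; push_cast; omega
          · rfl

-- A's second loop over value-blocks simulates B's sweep over the block values.
lemma sweep_sim (need : PySem.Dict Int Int) (kf : Int → Nat) :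
    ∀ (vals : List Int) (ans : Int) (res : List Int) (sp : PySem.Dict Int Int),
    (∀ x : Int, (res.count x : Int) = sp.getD x 0) →
    (∀ v ∈ vals, need.getD v 0 = (kf v : Int)) →
    ((vals.flatMap (fun v => List.replicate (kf v) v)).foldl solLoopA2 (ans, res)).1
      = (vals.foldl (solSweepB need) (ans, sp)).1 := by
  intro vals
  induction vals with
  | nil => intro ans res sp _ _; rfl
  | cons v rest ih =>
    intro ans res sp hsim hneed
    have hne : (v + 1) ≠ (v - 1) := by omega
    have hk : need.getD v 0 = (kf v : Int) := hneed v (List.mem_cons_self ..)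
    rw [List.flatMap_cons, List.foldl_append, List.foldl_cons]
    obtain ⟨g1, g2⟩ := blockA v (kf v) ans res
    have hstep : solSweepB need (ans, sp) v
        = (ans + min (kf v : Int) (sp.getD (v - 1) 0)
             + min ((kf v : Int) - min (kf v : Int) (sp.getD (v - 1) 0)) (sp.getD (v + 1) 0),
           (sp.insert (v - 1) (sp.getD (v - 1) 0 - min (kf v : Int) (sp.getD (v - 1) 0))).insert (v + 1)
             (sp.getD (v + 1) 0
               - min ((kf v : Int) - min (kf v : Int) (sp.getD (v - 1) 0)) (sp.getD (v + 1) 0))) := by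
      simp only [solSweepB, hk, PySem.Dict.getD_insert_of_ne sp _ _ hne]
    rw [hstep]
    have e1 : ((res.count (v - 1) : Int)) = sp.getD (v - 1) 0 := hsim _
    have e2 : ((res.count (v + 1) : Int)) = sp.getD (v + 1) 0 := hsim _
    rw [e1, e2] at g1
    rcases hP : List.foldl solLoopA2 (ans, res) (List.replicate (kf v) v) with ⟨a2, r2⟩
    rw [hP] at g1 g2
    simp only at g1 g2
    rw [g1]
    apply ih
    · intro x
      rw [g2 x, e1, e2]
      rw [PySem.Dict.getD_insert, PySem.Dict.getD_insert]
      by_cases hx1 : x = v - 1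
      · rw [if_pos hx1, if_neg (by omega : ¬ x = v + 1), if_pos hx1, hx1, e1]
      · rw [if_neg hx1, if_neg hx1]
        by_cases hx2 : x = v + 1
        · rw [if_pos hx2, if_pos hx2, hx2, e2]
        · rw [if_neg hx2, if_neg hx2, hsim x]
    · intro w hw; exact hneed w (List.mem_cons_of_mem _ hw)

-- count of a flatMap of replicates over distinct values
lemma count_flatMap_replicate (kf : Int → Nat) :
    ∀ (vals : List Int), vals.Nodup → ∀ x : Int,
      (vals.flatMap (fun v => List.replicate (kf v) v)).count x
        = if x ∈ vals then kf x else 0 := by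
  intro vals
  induction vals with
  | nil => intro _ x; simp
  | cons v rest ih =>
    intro hnd x
    rw [List.flatMap_cons, List.count_append, List.count_replicate, ih hnd.of_cons x]
    have hk : v ∉ rest := (List.nodup_cons.mp hnd).1
    by_cases hx : x = v
    · subst hx; simp [hk]
    · simp [hx, List.mem_cons]
      intro h; exact absurd h.symm hx

-- length of a list as the sum of its counts over a nodup cover
lemma length_eq_sum_counts : ∀ (ks l : List Int), ks.Nodup → (∀ x ∈ l, x ∈ ks) →
    (l.length : Int) = (ks.map (fun k => (l.count k : Int))).sum := by
  intro ks
  induction ks with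
  | nil =>
    intro l _ hsub
    have : l = [] := List.eq_nil_iff_forall_not_mem.mpr (fun x hx => by simpa using hsub x hx)
    simp [this]
  | cons k rest ih =>
    intro l hnd hsub
    have hk : k ∉ rest := (List.nodup_cons.mp hnd).1
    have hsplit : l.length = l.count k + (l.filter (fun x => x ≠ k)).length := by
      rw [List.count, List.length_eq_countP_add_countP (p := (· == k))]
      congr 1
      rw [← List.countP_eq_length_filter]
      apply List.countP_congr
      intro x _; simp
    have hcounts : ∀ y : Int, y ≠ k → (l.filter (fun x => x ≠ k)).count y = l.count y := by
      intro y hy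
      rw [List.count_filter]
      simp [hy]
    have hrec := ih (l.filter (fun x => x ≠ k)) hnd.of_cons (by
      intro x hx
      rw [List.mem_filter] at hx
      have := hsub x hx.1
      rcases List.mem_cons.mp this with h | h
      · exact absurd h (by simpa using hx.2)
      · exact h)
    rw [List.map_cons, List.sum_cons, hsplit]
    push_cast
    rw [hrec]
    have hmc : rest.map (fun y => (((l.filter (fun x => x ≠ k)).count y : Int))) = rest.map (fun y => ((l.count y : Int))) :=
      List.map_congr_left (fun y hy => by rw [hcounts y (fun h => hk (h ▸ hy))])
    rw [hmc]

-- flatMap of replicates over strictly increasing values is sorted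
lemma flatMap_replicate_pairwise (kf : Int → Nat) :
    ∀ (vals : List Int), vals.Pairwise (· < ·) →
      (vals.flatMap (fun v => List.replicate (kf v) v)).Pairwise (· ≤ ·) := by
  intro vals
  induction vals with
  | nil => intro _; simp
  | cons v rest ih =>
    intro hp
    rw [List.flatMap_cons, List.pairwise_append]
    refine ⟨List.pairwise_replicate.mpr (Or.inr le_rfl), ih hp.of_cons, ?_⟩
    intro a ha b hb
    rw [List.mem_replicate] at ha
    obtain ⟨w, hw, hbw⟩ := List.mem_flatMap.mp hb
    rw [List.mem_replicate] at hbw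
    have := (List.pairwise_cons.mp hp).1 w hw
    omega

-- ===== VERDICT =====
theorem solution_spec : Claim_equal_solution := by
  intro n lost reserve _
  show solution n lost reserve = solution_alt n lost reserve
  simp only [solution, solution_alt]
  obtain ⟨hRL, hR2⟩ := phase1_counts lost [] reserve
  simp only [List.count_nil, Nat.zero_add] at hRL
  -- the two counter dicts, bound with the port's own syntax
  set lc : PySem.Dict Int Int := lost.foldl (fun d p => d.insert p (d.getD p 0 + 1)) PySem.Dict.empty with hlc
  set rc : PySem.Dict Int Int := reserve.foldl (fun d r => d.insert r (d.getD r 0 + 1)) PySem.Dict.empty with hrc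
  rw [PySem.Dict.foldl_insert_getD_add_one_eq_counter] at hlc hrc
  have hlcD : ∀ x : Int, lc.getD x 0 = (lost.count x : Int) := by
    intro x; rw [hlc]; exact PySem.Dict.getD_counter ..
  have hrcD : ∀ x : Int, rc.getD x 0 = (reserve.count x : Int) := by
    intro x; rw [hrc]; exact PySem.Dict.getD_counter ..
  -- the two dict comprehensions
  set need := (lc.items.filter (fun vk => decide (rc.getD vk.1 0 < vk.2))).foldl
      (fun d vk => d.insert vk.1 (vk.2 - rc.getD vk.1 0)) PySem.Dict.empty with hneed
  set spare := (rc.items.filter (fun vk => decide (lc.getD vk.1 0 < vk.2))).foldl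
      (fun d vk => d.insert vk.1 (vk.2 - lc.getD vk.1 0)) PySem.Dict.empty with hspare
  -- the filtered key lists behind them
  set KSl := (PySem.Set.ofList lost).filter
      ((fun vk : Int × Int => decide (rc.getD vk.1 0 < vk.2)) ∘ (fun k => (k, (lost.count k : Int)))) with hKSl
  set KSr := (PySem.Set.ofList reserve).filter
      ((fun vk : Int × Int => decide (lc.getD vk.1 0 < vk.2)) ∘ (fun k => (k, (reserve.count k : Int)))) with hKSr
  have hmemKSl : ∀ x : Int, x ∈ KSl ↔ (x ∈ lost ∧ reserve.count x < lost.count x) := by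
    intro x
    rw [hKSl, List.mem_filter, PySem.Set.mem_ofList]
    simp [hrcD]
  have hmemKSr : ∀ x : Int, x ∈ KSr ↔ (x ∈ reserve ∧ lost.count x < reserve.count x) := by
    intro x
    rw [hKSr, List.mem_filter, PySem.Set.mem_ofList]
    simp [hlcD]
  have hndKSl : KSl.Nodup := (PySem.Set.nodup_ofList lost).filter _
  have hndKSr : KSr.Nodup := (PySem.Set.nodup_ofList reserve).filter _
  -- items / keys / lookups of `need`
  have hneedItems : need.items = KSl.map (fun k => (k, (lost.count k : Int) - rc.getD k 0)) := by
    rw [hneed, hlc, PySem.Dict.items_counter, List.filter_map,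
      PySem.Dict.items_foldl_insert_fresh _ _ _ _ (fun a _ => PySem.Dict.contains_empty _)
        (by rw [List.map_map]; simp only [Function.comp_def, List.map_id']; exact (hKSl ▸ hndKSl))]
    rw [List.map_map, ← hKSl]
    show ([] : List (Int × Int)) ++ KSl.map _ = _
    rw [List.nil_append]
    rfl
  have hneedKeys : need.keys = KSl := by
    simp only [PySem.Dict.keys, hneedItems, List.map_map]
    exact List.map_id' KSl
  have hndneedKeys : need.keys.Nodup := by rw [hneedKeys]; exact hndKSl
  have hneedD : ∀ v ∈ KSl, need.getD v 0 = (lost.count v : Int) - (reserve.count v : Int) := by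
    intro v hv
    have hmem : (v, (lost.count v : Int) - rc.getD v 0) ∈ need.items := by
      rw [hneedItems]; exact List.mem_map.mpr ⟨v, hv, rfl⟩
    rw [PySem.Dict.getD_of_mem_items _ hmem hndneedKeys, hrcD]
  -- items / keys / lookups of `spare`
  have hspareItems : spare.items = KSr.map (fun k => (k, (reserve.count k : Int) - lc.getD k 0)) := by
    rw [hspare, hrc, PySem.Dict.items_counter, List.filter_map,
      PySem.Dict.items_foldl_insert_fresh _ _ _ _ (fun a _ => PySem.Dict.contains_empty _)
        (by rw [List.map_map]; simp only [Function.comp_def, List.map_id']; exact (hKSr ▸ hndKSr))]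
    rw [List.map_map, ← hKSr]
    show ([] : List (Int × Int)) ++ KSr.map _ = _
    rw [List.nil_append]
    rfl
  have hspareKeys : spare.keys = KSr := by
    simp only [PySem.Dict.keys, hspareItems, List.map_map]
    exact List.map_id' KSr
  have hndspareKeys : spare.keys.Nodup := by rw [hspareKeys]; exact hndKSr
  have hspareD : ∀ x : Int, spare.getD x 0
      = if x ∈ KSr then (reserve.count x : Int) - (lost.count x : Int) else 0 := by
    intro x
    by_cases hx : x ∈ KSr
    · have hmem : (x, (reserve.count x : Int) - lc.getD x 0) ∈ spare.items := by
        rw [hspareItems]; exact List.mem_map.mpr ⟨x, hx, rfl⟩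
      rw [PySem.Dict.getD_of_mem_items _ hmem hndspareKeys, hlcD, if_pos hx]
    · rw [if_neg hx]
      apply PySem.Dict.getD_of_not_contains
      rw [PySem.Dict.contains_eq_decide_mem_keys, hspareKeys]
      simpa using hx
  -- the simulation relation between A's reserve list after phase 1 and `spare`
  have hsim : ∀ x : Int, (((lost.foldl solLoopA1 ([], reserve)).2.count x : Int)) = spare.getD x 0 := by
    intro x
    rw [hR2 x, hspareD x]
    by_cases hx : x ∈ KSr
    · rw [if_pos hx]
      obtain ⟨-, hlt⟩ := (hmemKSr x).mp hx
      omega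
    · rw [if_neg hx]
      rw [hmemKSr x] at hx
      by_cases hm : x ∈ reserve
      · have : ¬ lost.count x < reserve.count x := fun h => hx ⟨hm, h⟩
        omega
      · have : reserve.count x = 0 := List.count_eq_zero.mpr hm
        omega
  -- block sizes
  set kf : Int → Nat := fun v => lost.count v - reserve.count v with hkf
  have hneedVS : ∀ v ∈ PySem.List.sorted KSl (fun x => x) false, need.getD v 0 = (kf v : Int) := by
    intro v hv
    rw [PySem.List.mem_sorted] at hv
    obtain ⟨-, hlt⟩ := (hmemKSl v).mp hv
    rw [hneedD v hv, hkf]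
    push_cast [Nat.cast_sub (Nat.le_of_lt hlt)]
    ring
  -- the sorted real_lost list is the flatMap of replicates over the sorted needy values
  have hVSnodup : (PySem.List.sorted KSl (fun x => x) false).Nodup :=
    (PySem.List.sorted_perm KSl (fun x => x) false).symm.nodup hndKSl
  have hVSlt : (PySem.List.sorted KSl (fun x => x) false).Pairwise (· < ·) := by
    have h1 := PySem.List.sorted_pairwise KSl (fun x => x)
    have h2 : (PySem.List.sorted KSl (fun x => x) false).Pairwise (· ≠ ·) := hVSnodup
    exact (h1.and h2).imp (fun h => lt_of_le_of_ne h.1 h.2)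
  have hsorted : PySem.List.sorted (lost.foldl solLoopA1 ([], reserve)).1 (fun x => x) false
      = (PySem.List.sorted KSl (fun x => x) false).flatMap (fun v => List.replicate (kf v) v) := by
    apply PySem.List.sorted_id_eq_of_perm_of_pairwise
    · apply List.perm_iff_count.mpr
      intro x
      rw [count_flatMap_replicate kf _ hVSnodup x, hRL x]
      by_cases hx : x ∈ KSl
      · rw [if_pos ((PySem.List.mem_sorted KSl (fun x => x) false x).mpr hx)]
        obtain ⟨-, hlt⟩ := (hmemKSl x).mp hx
        simp only [hkf]
        omega
      · rw [if_neg (fun h => hx ((PySem.List.mem_sorted KSl (fun x => x) false x).mp h))]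
        rw [hmemKSl x] at hx
        by_cases hm : x ∈ lost
        · have : ¬ reserve.count x < lost.count x := fun h => hx ⟨hm, h⟩
          omega
        · have : lost.count x = 0 := List.count_eq_zero.mpr hm
          omega
    · exact flatMap_replicate_pairwise kf _ hVSlt
  -- the initial answers agree
  have hanswer : (((lost.foldl solLoopA1 ([], reserve)).1.length : Int)) = need.values.sum := by
    have hsub : ∀ x ∈ (lost.foldl solLoopA1 ([], reserve)).1, x ∈ KSl := by
      intro x hx
      have hpos : 0 < (lost.foldl solLoopA1 ([], reserve)).1.count x := List.count_pos_iff.mpr hx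
      rw [hRL x] at hpos
      refine (hmemKSl x).mpr ⟨List.count_pos_iff.mp (by omega), by omega⟩
    rw [length_eq_sum_counts KSl _ hndKSl hsub]
    have hvals : need.values = KSl.map (fun k => (lost.count k : Int) - rc.getD k 0) := by
      simp only [PySem.Dict.values, hneedItems, List.map_map]
      rfl
    rw [hvals]
    congr 1
    apply List.map_congr_left
    intro k hk
    obtain ⟨-, hlt⟩ := (hmemKSl k).mp hk
    rw [hRL k, hrcD]
    omega
  -- assemble
  rw [hneedKeys, hsorted, hanswer]
  exact sweep_sim need kf _ _ _ _ hsim hneedVS
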